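-- pv_equiv track=rewrite | github.com/Jang-Luke/python_study | 20230801.py | solution2
-- ===== SOURCE A (Python) =====
-- id_list = ["muzi","frodo","apeach","neo"]
--
-- report = ["muzi frodo","apeach frodo","frodo neo","muzi neo","apeach muzi"]
--
-- k = 2
--
-- def solution2(id_list, report, k):
--     # 신고 [유저ID : 유저가 신고한 ID]
--     declaration =  {key: set() for key in id_list}
--     # 정지 [유저ID : 신고된 횟수]
--     stop = {key: 0 for key in id_list}
--     # 신고 & 정지 작업
--     for re in report:
--         id, r_id = re.split(' ', 1)
--         # 중복 신고 확인 (set이여서 할 필요는 없지만 중복 정지 증가를 막기위해 추가)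
--         if r_id not in declaration[id]:
--             declaration[id].add(r_id)
--             stop[r_id] += 1
--     # 정지 중 k 미만 삭제
--     ban = [key for key, value in stop.items() if value >= k]
--     # 신고 중 정지된 ID 카운트
--     return [len(declaration[key].intersection(set(ban))) for key, value in declaration.items()]
-- ===== SOURCE B (Python) =====
-- def solution2(id_list, report, k):
--     # one pass to dedupe reports into distinct (reporter, reported) pairs
--     pairs = set()
--     for r in report:
--         reporter, reported = r.split(' ', 1)
--         pairs.add((reporter, reported))
--     # distinct-reporter count per reported user
--     cnt = {}
--     for _, reported in pairs:
--         cnt[reported] = cnt.get(reported, 0) + 1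
--     banned = {u for u, c in cnt.items() if c >= k}
--     # per-reporter tally of banned users they reported
--     result = {u: 0 for u in id_list}
--     for reporter, reported in pairs:
--         if reported in banned:
--             result[reporter] += 1
--     return [result[u] for u in id_list]
-- ===== Notes on version B (the rewrite author's own statement) =====
-- stated objective: alternative
-- what changed: B dedupes reports once into a set of (reporter, reported) pairs and then makes one counting pass (distinct reporters per reported user) and one tallying pass over those pairs, instead of A's per-user declaration sets with a set(ban) rebuilt and intersected for every user.
-- outside the precondition, e.g. on solution2(['a', 'a'], [], 0): A returns [0], B returns [0, 0]
import Mathlib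
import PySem

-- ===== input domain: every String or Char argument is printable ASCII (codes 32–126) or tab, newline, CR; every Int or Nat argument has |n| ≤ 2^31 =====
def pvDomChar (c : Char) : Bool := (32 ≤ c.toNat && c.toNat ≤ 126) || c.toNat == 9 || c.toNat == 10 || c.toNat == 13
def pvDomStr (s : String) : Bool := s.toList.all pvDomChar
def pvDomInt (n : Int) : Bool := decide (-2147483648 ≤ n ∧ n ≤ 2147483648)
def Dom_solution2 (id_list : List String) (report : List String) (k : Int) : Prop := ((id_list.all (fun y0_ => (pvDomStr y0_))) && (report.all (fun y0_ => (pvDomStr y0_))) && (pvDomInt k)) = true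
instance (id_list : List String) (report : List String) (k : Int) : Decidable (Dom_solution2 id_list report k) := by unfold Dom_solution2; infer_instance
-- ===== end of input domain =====

-- B dedupes reports once into a set of (reporter, reported) pairs and then makes one counting
-- pass and one tallying pass over those pairs, instead of A's per-user declaration sets with a
-- set(ban) rebuilt and intersected for every user (objective: alternative decomposition).

-- `x, y = r.split(' ', 1)` as both Pythons perform it: none = ValueError (no space in r).
def pvSplit2? (r : String) : Option (String × String) :=
  match PySem.Str.splitMax? r " " 1 with
  | some [a, b] => some (a, b)
  | _ => none

-- ===== PORT A =====
def solution2 (id_list : List String) (report : List String) (k : Int) : List Int :=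
  let declaration : PySem.Dict String (PySem.Set String) :=
    id_list.foldl (fun d key => d.insert key PySem.Set.empty) PySem.Dict.empty
  let stop : PySem.Dict String Int :=
    id_list.foldl (fun d key => d.insert key 0) PySem.Dict.empty
  let st :=
    report.foldl
      (fun (st : PySem.Dict String (PySem.Set String) × PySem.Dict String Int) re =>
        match pvSplit2? re with
        | some (idd, r_id) =>
          -- declaration[id]: KeyError when idd is not a key — outside Pre_
          let s := st.1.getD idd PySem.Set.empty
          if PySem.Set.contains s r_id then st
          else
            -- declaration[id].add(r_id); stop[r_id] += 1 (KeyError when r_id absent — outside Pre_)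
            (st.1.insert idd (PySem.Set.add s r_id), st.2.modify r_id 0 (· + 1))
        | none => st)  -- ValueError while unpacking the split — outside Pre_
      (declaration, stop)
  let ban : List String :=
    st.2.items.foldl (fun acc p => if p.2 ≥ k then acc ++ [p.1] else acc) []
  st.1.items.foldl
    (fun acc p => acc ++ [((PySem.Set.inter p.2 (PySem.Set.ofList ban)).length : Int)]) []

-- ===== PORT B =====
def solution2_alt (id_list : List String) (report : List String) (k : Int) : List Int :=
  let pairs : PySem.Set (String × String) :=
    report.foldl
      (fun s r =>
        match pvSplit2? r with
        | some p => PySem.Set.add s p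
        | none => s)  -- ValueError while unpacking the split — outside Pre_
      PySem.Set.empty
  let cnt : PySem.Dict String Int :=
    pairs.foldl (fun d p => d.modify p.2 0 (· + 1)) PySem.Dict.empty
  let banned : PySem.Set String :=
    cnt.items.foldl (fun s p => if p.2 ≥ k then PySem.Set.add s p.1 else s) PySem.Set.empty
  let result0 : PySem.Dict String Int :=
    id_list.foldl (fun d u => d.insert u 0) PySem.Dict.empty
  let result : PySem.Dict String Int :=
    pairs.foldl
      (fun d p =>
        if PySem.Set.contains banned p.2 then d.modify p.1 0 (· + 1) else d)
      result0
  id_list.foldl (fun acc u => acc ++ [result.getD u 0]) []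

-- ===== PRECONDITION & SPEC =====
-- Pre_ excludes (a) reports that make A raise: a report without a space (ValueError) or whose
-- reporter / reported part is not in id_list (KeyError), and (b) id_list with duplicates, on
-- which A's output length (one entry per DISTINCT id, a dict-key artefact) and B's per-position
-- output are both defensible.
def Pre_solution2 (id_list : List String) (report : List String) (k : Int) : Prop :=
  id_list.Nodup ∧ ∀ r ∈ report,
    ((pvSplit2? r).any (fun p => id_list.contains p.1 && id_list.contains p.2)) = true
instance (id_list : List String) (report : List String) (k : Int) : Decidable (Pre_solution2 id_list report k) := by unfold Pre_solution2; infer_instance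

def pvWitness_solution2 : List String × List String × Int :=
  (["muzi", "frodo", "apeach", "neo"],
   ["muzi frodo", "apeach frodo", "frodo neo", "muzi neo", "apeach muzi"], 2)

def Spec_solution2 (id_list : List String) (report : List String) (k : Int) (out : List Int) : Prop := out = solution2_alt id_list report k
instance (id_list : List String) (report : List String) (k : Int) (out : List Int) : Decidable (Spec_solution2 id_list report k out) := by unfold Spec_solution2; infer_instance

-- ===== CLAIM (what is proved, stated in full; the proofs are below) =====
def Claim_equal_solution2 : Prop := ∀ (id_list : List String) (report : List String) (k : Int), Dom_solution2 id_list report k → Pre_solution2 id_list report k → Spec_solution2 id_list report k (solution2 id_list report k)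

-- ===== LEMMAS AND PROOFS =====

def pvParse (r : String) : String × String := (pvSplit2? r).getD ("", "")

-- A's report-loop body as a function of the parsed pair
def pvStepA (st : PySem.Dict String (PySem.Set String) × PySem.Dict String Int)
    (p : String × String) :
    PySem.Dict String (PySem.Set String) × PySem.Dict String Int :=
  let s := st.1.getD p.1 PySem.Set.empty
  if PySem.Set.contains s p.2 then st
  else (st.1.insert p.1 (PySem.Set.add s p.2), st.2.modify p.2 0 (· + 1))

lemma pv_getD_foldl_insert_const {ν : Type} (c : ν) (l : List String) :
    ∀ (d : PySem.Dict String ν), (∀ u, d.getD u c = c) →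
      ∀ u, (l.foldl (fun d x => d.insert x c) d).getD u c = c := by
  induction l with
  | nil => intro d h u; simpa using h u
  | cons x t ih =>
      intro d h u
      simp only [List.foldl_cons]
      refine ih _ (fun v => ?_) u
      rw [PySem.Dict.getD_insert]
      split
      · rfl
      · exact h v

lemma pv_keys_foldl_insert_const {ν : Type} (c : ν) (ids : List String) (hnd : ids.Nodup) :
    (ids.foldl (fun d x => d.insert x c) PySem.Dict.empty).keys = ids := by
  have := PySem.Dict.keys_foldl_insert ids (fun _ _ => c) PySem.Dict.empty
  simpa [PySem.Set.update_nil_left, PySem.Set.ofList_eq_self_of_nodup _ hnd] using this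

lemma pv_mem_secfilter {P : List (String × String)} {u b : String} :
    (b ∈ (P.filter (fun p => p.1 == u)).map Prod.snd) ↔ (u, b) ∈ P := by
  simp only [List.mem_map, List.mem_filter, beq_iff_eq]
  constructor
  · rintro ⟨⟨x, y⟩, ⟨hq, h1⟩, h2⟩
    simp only at h1 h2
    subst h1; subst h2; exact hq
  · intro h; exact ⟨(u, b), ⟨h, rfl⟩, rfl⟩

lemma pv_loopA_inv (ids : List String) (hnd : ids.Nodup) :
    ∀ (L : List (String × String)), (∀ p ∈ L, p.1 ∈ ids ∧ p.2 ∈ ids) →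
    (∀ u, (L.foldl pvStepA
        (ids.foldl (fun d key => d.insert key PySem.Set.empty) PySem.Dict.empty,
         ids.foldl (fun d key => d.insert key (0 : Int)) PySem.Dict.empty)).1.getD u PySem.Set.empty
        = ((PySem.Set.ofList L).filter (fun p => p.1 == u)).map Prod.snd)
    ∧ (L.foldl pvStepA
        (ids.foldl (fun d key => d.insert key PySem.Set.empty) PySem.Dict.empty,
         ids.foldl (fun d key => d.insert key (0 : Int)) PySem.Dict.empty)).1.keys = ids
    ∧ (∀ u, (L.foldl pvStepA
        (ids.foldl (fun d key => d.insert key PySem.Set.empty) PySem.Dict.empty,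
         ids.foldl (fun d key => d.insert key (0 : Int)) PySem.Dict.empty)).2.getD u 0
        = (((PySem.Set.ofList L).map Prod.snd).count u : Int))
    ∧ (L.foldl pvStepA
        (ids.foldl (fun d key => d.insert key PySem.Set.empty) PySem.Dict.empty,
         ids.foldl (fun d key => d.insert key (0 : Int)) PySem.Dict.empty)).2.keys = ids := by
  intro L
  induction L using List.reverseRecOn with
  | nil =>
      intro _
      refine ⟨fun u => ?_, ?_, fun u => ?_, ?_⟩
      · simpa [PySem.Set.ofList] using
          pv_getD_foldl_insert_const PySem.Set.empty ids PySem.Dict.empty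
            (fun v => PySem.Dict.getD_empty ..) u
      · simpa using pv_keys_foldl_insert_const PySem.Set.empty ids hnd
      · simpa [PySem.Set.ofList] using
          pv_getD_foldl_insert_const (0 : Int) ids PySem.Dict.empty
            (fun v => PySem.Dict.getD_empty ..) u
      · simpa using pv_keys_foldl_insert_const (0 : Int) ids hnd
  | append_singleton L p ih =>
      intro hL
      have hLp : ∀ q ∈ L, q.1 ∈ ids ∧ q.2 ∈ ids := fun q h => hL q (List.mem_append_left _ h)
      have hp : p.1 ∈ ids ∧ p.2 ∈ ids := hL p (by simp)
      obtain ⟨h1, h2, h3, h4⟩ := ih hLp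
      simp only [List.foldl_append, List.foldl_cons, List.foldl_nil]
      rw [PySem.Set.ofList_append_singleton]
      obtain ⟨x, y⟩ := p
      simp only [pvStepA]
      by_cases hmem : (x, y) ∈ PySem.Set.ofList L
      · rw [if_pos (by simp only [PySem.Set.contains_iff, h1]; exact pv_mem_secfilter.2 hmem),
            PySem.Set.add_of_mem hmem]
        exact ⟨h1, h2, h3, h4⟩
      · have hnb : y ∉ ((PySem.Set.ofList L).filter (fun q => q.1 == x)).map Prod.snd :=
          fun h => hmem (pv_mem_secfilter.1 h)
        rw [if_neg (by simp only [PySem.Set.contains_iff, h1]; exact hnb),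
            PySem.Set.add_of_not_mem hmem]
        refine ⟨fun u => ?_, ?_, fun u => ?_, ?_⟩
        · rw [PySem.Dict.getD_insert, List.filter_append, List.map_append]
          by_cases hu : u = x
          · subst hu
            rw [if_pos rfl, h1 u, PySem.Set.add_of_not_mem hnb]
            simp
          · rw [if_neg hu, h1 u]
            simp [Ne.symm hu]
        · rw [PySem.Dict.keys_insert_of_contains _ _
              ((PySem.Dict.contains_iff_mem_keys _ _).2 (by rw [h2]; exact hp.1))]
          exact h2
        · rw [PySem.Dict.getD_modify, List.map_append, List.count_append]
          by_cases hu : u = y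
          · subst hu
            rw [if_pos rfl, h3 u]
            push_cast
            simp
          · rw [if_neg hu, h3 u]
            simp [Ne.symm hu]
        · rw [PySem.Dict.keys_modify,
              PySem.Dict.keys_insert_of_contains _ _
                ((PySem.Dict.contains_iff_mem_keys _ _).2 (by rw [h4]; exact hp.2))]
          exact h4

lemma pv_foldA_eq (rs : List String)
    (h : ∀ r ∈ rs, pvSplit2? r = some (pvParse r))
    (init : PySem.Dict String (PySem.Set String) × PySem.Dict String Int) :
    rs.foldl
      (fun (st : PySem.Dict String (PySem.Set String) × PySem.Dict String Int) re =>
        match pvSplit2? re with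
        | some (idd, r_id) =>
          let s := st.1.getD idd PySem.Set.empty
          if PySem.Set.contains s r_id then st
          else (st.1.insert idd (PySem.Set.add s r_id), st.2.modify r_id 0 (· + 1))
        | none => st) init
      = (rs.map pvParse).foldl pvStepA init := by
  rw [List.foldl_map]
  refine PySem.List.foldl_congr_mem _ _ _ _ (fun acc r hr => ?_)
  rw [h r hr]
  rcases hq : pvParse r with ⟨a, b⟩
  rfl

lemma pv_foldB_eq (rs : List String)
    (h : ∀ r ∈ rs, pvSplit2? r = some (pvParse r)) :
    rs.foldl
      (fun s r =>
        match pvSplit2? r with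
        | some p => PySem.Set.add s p
        | none => s) PySem.Set.empty
      = PySem.Set.ofList (rs.map pvParse) := by
  rw [PySem.Set.ofList_eq_foldl, List.foldl_map]
  refine PySem.List.foldl_congr_mem _ _ _ _ (fun acc r hr => ?_)
  rw [h r hr]

theorem pv_main (ids report : List String) (k : Int) (hnd : ids.Nodup)
    (hsp : ∀ r ∈ report, pvSplit2? r = some (pvParse r))
    (hmem : ∀ r ∈ report, (pvParse r).1 ∈ ids ∧ (pvParse r).2 ∈ ids) :
    solution2 ids report k = solution2_alt ids report k := by
  have hL : ∀ p ∈ report.map pvParse, p.1 ∈ ids ∧ p.2 ∈ ids := by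
    rintro p hp
    obtain ⟨r, hr, rfl⟩ := List.mem_map.1 hp
    exact hmem r hr
  obtain ⟨h1, h2, h3, h4⟩ := pv_loopA_inv ids hnd (report.map pvParse) hL
  simp only [solution2, solution2_alt]
  rw [pv_foldA_eq report hsp, pv_foldB_eq report hsp]
  rw [PySem.Dict.items_eq_map_keys _ (by rw [h4]; exact hnd) 0, h4]
  rw [PySem.Dict.items_eq_map_keys _ (by rw [h2]; exact hnd) PySem.Set.empty, h2]
  simp only [h1, h3]
  set L' := List.map pvParse report with hL'
  set P := PySem.Set.ofList L' with hP
  -- characterize B's cnt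
  set cnt : PySem.Dict String Int := List.foldl (fun d p => d.modify p.2 0 fun x => x + 1) PySem.Dict.empty P with hcnt
  have hcntD : ∀ v, cnt.getD v 0 = ((P.map Prod.snd).count v : Int) := by
    intro v
    rw [hcnt, ← List.foldl_map (f := Prod.snd)
          (g := fun (d : PySem.Dict String Int) x => d.modify x 0 fun v => v + 1)
          (l := P) (init := PySem.Dict.empty),
        PySem.Dict.getD_foldl_modify_add_one]
    simp
  have hcntK : cnt.keys = PySem.Set.ofList (P.map Prod.snd) := by
    rw [hcnt]
    have := PySem.Dict.keys_foldl_modify_key (ν := Int) P Prod.snd 0 (fun _ _ => (· + 1)) PySem.Dict.empty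
    simpa [PySem.Set.update_nil_left] using this
  have hcntnd : cnt.keys.Nodup := by rw [hcntK]; exact PySem.Set.nodup_ofList _
  set banned := List.foldl (fun s p => if p.2 ≥ k then PySem.Set.add s p.1 else s) PySem.Set.empty cnt.items with hbanned
  have hbn : ∀ b, banned.contains b = true ↔ (b ∈ P.map Prod.snd ∧ k ≤ ((P.map Prod.snd).count b : Int)) := by
    intro b
    rw [hbanned,
        PySem.List.foldl_ite_eq_foldl_filter (p := fun (q : String × Int) => q.2 ≥ k)
          (f := fun (s : PySem.Set String) (q : String × Int) => s.add q.1)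
          (l := cnt.items) (init := PySem.Set.empty),
        ← PySem.Set.update_map_eq_foldl_add _ Prod.fst PySem.Set.empty,
        PySem.Set.update_empty, PySem.Set.contains_iff, PySem.Set.mem_ofList,
        PySem.Dict.items_eq_map_keys cnt hcntnd 0, hcntK]
    simp only [List.mem_map, List.mem_filter, ge_iff_le, decide_eq_true_eq]
    constructor
    · rintro ⟨a, ⟨⟨v, hv, rfl⟩, hk⟩, rfl⟩
      rw [PySem.Set.mem_ofList, List.mem_map] at hv
      obtain ⟨p, hpP, hp2⟩ := hv
      refine ⟨⟨p, hpP, hp2⟩, ?_⟩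
      rwa [hcntD] at hk
    · rintro ⟨⟨p, hpP, rfl⟩, hk⟩
      refine ⟨(p.2, cnt.getD p.2 0), ⟨⟨p.2, ?_, rfl⟩, ?_⟩, rfl⟩
      · rw [PySem.Set.mem_ofList]
        exact List.mem_map_of_mem hpP
      · rwa [hcntD]
  set result : PySem.Dict String Int := List.foldl
      (fun d p => if banned.contains p.2 = true then d.modify p.1 0 fun x => x + 1 else d)
      (List.foldl (fun d key => d.insert key 0) PySem.Dict.empty ids) P with hresult
  have hresD : ∀ u, result.getD u 0
      = (((P.filter (fun p => banned.contains p.2)).map Prod.fst).count u : Int) := by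
    intro u
    rw [hresult,
        PySem.List.foldl_if_eq_foldl_filter (p := fun (q : String × String) => banned.contains q.2)
          (f := fun (d : PySem.Dict String Int) (q : String × String) => d.modify q.1 0 (· + 1))
          (l := P),
        ← List.foldl_map (f := Prod.fst)
          (g := fun (d : PySem.Dict String Int) x => d.modify x 0 fun v => v + 1)
          (l := P.filter fun p => banned.contains p.2),
        PySem.Dict.getD_foldl_modify_add_one,
        pv_getD_foldl_insert_const (0 : Int) ids PySem.Dict.empty
          (fun v => PySem.Dict.getD_empty ..) u]
    simp
  rw [PySem.List.foldl_append_ite (p := fun (q : String × Int) => q.2 ≥ k)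
        (f := fun (q : String × Int) => q.1)]
  rw [PySem.List.foldl_append_singleton_eq_map, PySem.List.foldl_append_singleton_eq_map]
  simp only [List.nil_append, List.filter_map, List.map_map]
  apply List.map_congr_left
  intro u hu
  simp only [Function.comp_def, hresD]
  norm_cast
  simp only [PySem.Set.inter]
  rw [← List.countP_eq_length_filter, List.countP_map, List.count_eq_countP, List.countP_map,
      List.countP_filter, List.countP_filter]
  apply List.countP_congr
  intro p hpP
  have hpm : p ∈ L' := by
    rw [hP, PySem.Set.mem_ofList] at hpP
    exact hpP
  have hp2ids : p.2 ∈ ids := (hL p hpm).2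
  have hp2m : p.2 ∈ List.map Prod.snd P := List.mem_map_of_mem hpP
  simp only [Function.comp_def, Bool.and_eq_true, beq_iff_eq, decide_eq_true_eq,
    PySem.Set.contains_iff, PySem.Set.mem_ofList, List.mem_filter, List.mem_map, hbn, ge_iff_le]
  constructor
  · rintro ⟨⟨b, ⟨hb1, hb2⟩, rfl⟩, hpu⟩
    exact ⟨hpu, ⟨p, hpP, rfl⟩, hb2⟩
  · rintro ⟨hpu, _, hb2⟩
    exact ⟨⟨p.2, ⟨hp2ids, hb2⟩, rfl⟩, hpu⟩

-- ===== VERDICT (by name: the statement is the Claim_ definition above) =====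
theorem solution2_spec : Claim_equal_solution2 := by
  intro ids report k _ hpre
  obtain ⟨hnd, hrep⟩ := hpre
  have hsp : ∀ r ∈ report, pvSplit2? r = some (pvParse r) := by
    intro r hr
    have h := hrep r hr
    cases hq : pvSplit2? r with
    | none => rw [hq] at h; simp at h
    | some p => rw [pvParse, hq]; rfl
  have hmemc : ∀ r ∈ report, (pvParse r).1 ∈ ids ∧ (pvParse r).2 ∈ ids := by
    intro r hr
    have h := hrep r hr
    cases hq : pvSplit2? r with
    | none => rw [hq] at h; simp at h
    | some p =>
        rw [hq] at h
        rw [pvParse, hq]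
        simpa using h
  exact pv_main ids report k hnd hsp hmemc
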